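-- pv_equiv track=rewrite | github.com/brendonthiede/advent-of-code | 2024/day22/solution.py | find_patterns
-- ===== SOURCE A (Python) =====
-- from typing import List, Dict, Tuple
--
-- def find_patterns(prices: List[int]) -> Dict[Tuple[int, int, int, int], int]:
--     changes = [prices[i+1] - prices[i] for i in range(len(prices)-1)]
--     patterns = {}
--
--     for i in range(len(changes)-3):
--         pattern = (changes[i], changes[i+1], changes[i+2], changes[i+3])
--         # Only store the first occurrence of each pattern
--         if pattern not in patterns:
--             patterns[pattern] = prices[i+4]
--
--     return patterns
-- ===== SOURCE B (Python) =====
-- def find_patterns(prices):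
--     n = len(prices) - 4
--     pats = [(prices[i + 1] - prices[i], prices[i + 2] - prices[i + 1],
--              prices[i + 3] - prices[i + 2], prices[i + 4] - prices[i + 3])
--             for i in range(n)]
--     first = {}
--     for i in reversed(range(n)):
--         first[pats[i]] = i
--     return {p: prices[i + 4] for i, p in enumerate(pats) if first[p] == i}
-- ===== Notes on version B (the rewrite author's own statement) =====
-- stated objective: alternative
-- what changed: Replaces A's single accumulating pass with a membership-guarded dict by two staged passes: a reverse-order unconditional overwrite builds a pattern-to-earliest-index map, then a forward comprehension keeps exactly the windows whose index equals that earliest index.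
import Mathlib
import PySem

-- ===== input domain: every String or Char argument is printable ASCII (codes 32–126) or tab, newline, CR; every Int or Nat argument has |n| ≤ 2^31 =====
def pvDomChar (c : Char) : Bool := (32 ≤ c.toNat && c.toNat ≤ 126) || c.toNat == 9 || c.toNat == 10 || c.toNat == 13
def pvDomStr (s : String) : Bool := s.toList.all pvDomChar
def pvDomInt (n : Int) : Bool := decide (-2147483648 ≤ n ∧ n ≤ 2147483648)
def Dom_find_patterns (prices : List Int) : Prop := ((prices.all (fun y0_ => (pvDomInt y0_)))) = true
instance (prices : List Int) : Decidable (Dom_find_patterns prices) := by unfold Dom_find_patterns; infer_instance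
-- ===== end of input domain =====

-- B replaces A's single guarded accumulating pass by two staged passes (a reverse
-- unconditional overwrite building a pattern→earliest-index map, then a forward
-- filter by that index); same return value, proved equal.

-- ===== PORT A =====
-- all indices A uses are in range, so pyGetD (default 0) is exact here
def find_patterns (prices : List Int) : List (Int × Int × Int × Int × Int) :=
  let changes := (PySem.List.pyRange 0 ((prices.length : Int) - 1) 1).map
      (fun i => PySem.List.pyGetD prices (i + 1) 0 - PySem.List.pyGetD prices i 0)
  let patterns := (PySem.List.pyRange 0 ((changes.length : Int) - 3) 1).foldl
      (fun (d : PySem.Dict (Int × Int × Int × Int) Int) i =>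
        let pattern := (PySem.List.pyGetD changes i 0, PySem.List.pyGetD changes (i + 1) 0,
                        PySem.List.pyGetD changes (i + 2) 0, PySem.List.pyGetD changes (i + 3) 0)
        if d.contains pattern then d
        else d.insert pattern (PySem.List.pyGetD prices (i + 4) 0))
      PySem.Dict.empty
  patterns.items.map (fun p => (p.1.1, p.1.2.1, p.1.2.2.1, p.1.2.2.2, p.2))

-- ===== PORT B =====
-- `first[p]` in B's comprehension never raises (every p of pats is a key of first),
-- so porting it as getD with default -1 (never a valid index) is exact.
def find_patterns_alt (prices : List Int) : List (Int × Int × Int × Int × Int) :=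
  let n : Int := (prices.length : Int) - 4
  let pats := (PySem.List.pyRange 0 n 1).map (fun i =>
      (PySem.List.pyGetD prices (i + 1) 0 - PySem.List.pyGetD prices i 0,
       PySem.List.pyGetD prices (i + 2) 0 - PySem.List.pyGetD prices (i + 1) 0,
       PySem.List.pyGetD prices (i + 3) 0 - PySem.List.pyGetD prices (i + 2) 0,
       PySem.List.pyGetD prices (i + 4) 0 - PySem.List.pyGetD prices (i + 3) 0))
  let first := ((PySem.List.pyRange 0 n 1).reverse).foldl
      (fun (d : PySem.Dict (Int × Int × Int × Int) Int) i =>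
        d.insert (PySem.List.pyGetD pats i (0, 0, 0, 0)) i)
      PySem.Dict.empty
  let out := (PySem.List.enumerate pats).foldl
      (fun (d : PySem.Dict (Int × Int × Int × Int) Int) ip =>
        if first.getD ip.2 (-1) == ip.1 then d.insert ip.2 (PySem.List.pyGetD prices (ip.1 + 4) 0)
        else d)
      PySem.Dict.empty
  out.items.map (fun p => (p.1.1, p.1.2.1, p.1.2.2.1, p.1.2.2.2, p.2))

-- ===== PRECONDITION & SPEC =====
def Spec_find_patterns (prices : List Int) (out : List (Int × Int × Int × Int × Int)) : Prop := out = find_patterns_alt prices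
instance (prices : List Int) (out : List (Int × Int × Int × Int × Int)) : Decidable (Spec_find_patterns prices out) := by unfold Spec_find_patterns; infer_instance

-- ===== CLAIM (what is proved, stated in full; the proofs are below) =====
def Claim_equal_find_patterns : Prop := ∀ (prices : List Int), Dom_find_patterns prices → Spec_find_patterns prices (find_patterns prices)

-- ===== LEMMAS AND PROOFS =====

-- the pattern→earliest-index dict of B (F = pattern at a window index, over range [0, n))
def pvFirst (F : Int → Int × Int × Int × Int) (n : Int) : PySem.Dict (Int × Int × Int × Int) Int :=
  ((PySem.List.pyRange 0 n).reverse).foldl (fun d i => d.insert (F i) i) PySem.Dict.empty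

-- A's accumulating guarded fold over [0, m)
def pvA (F : Int → Int × Int × Int × Int) (V : Int → Int) (m : Int) : PySem.Dict (Int × Int × Int × Int) Int :=
  (PySem.List.pyRange 0 m).foldl
    (fun d i => if d.contains (F i) then d else d.insert (F i) (V i)) PySem.Dict.empty

-- B's filtered fold over [0, m), filtering by the earliest-index map for [0, n)
def pvB (F : Int → Int × Int × Int × Int) (V : Int → Int) (n m : Int) : PySem.Dict (Int × Int × Int × Int) Int :=
  (PySem.List.pyRange 0 m).foldl
    (fun d i => if (pvFirst F n).getD (F i) (-1) == i then d.insert (F i) (V i) else d) PySem.Dict.empty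

theorem pv_get?_foldl_insert_idx (F : Int → Int × Int × Int × Int) (l : List Int)
    (d : PySem.Dict (Int × Int × Int × Int) Int) (p : Int × Int × Int × Int) :
    (l.foldl (fun d i => d.insert (F i) i) d).get? p
      = (l.reverse.find? (fun i => F i == p)).or (d.get? p) := by
  induction l generalizing d with
  | nil => simp
  | cons a t ih =>
      simp only [List.foldl_cons, ih, List.reverse_cons, List.find?_append, Option.or_assoc]
      congr 1
      by_cases h : F a = p
      · simp [List.find?, h]
      · have h' : (F a == p) = false := by simpa using h
        have h'' : p ≠ F a := fun e => h e.symm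
        simp [List.find?, h', PySem.Dict.get?_insert, h'']

theorem pv_first_get? (F : Int → Int × Int × Int × Int) (n : Int) (p : Int × Int × Int × Int) :
    (pvFirst F n).get? p = (PySem.List.pyRange 0 n).find? (fun i => F i == p) := by
  unfold pvFirst
  rw [pv_get?_foldl_insert_idx]
  simp

theorem pv_cond_iff (F : Int → Int × Int × Int × Int) (n i : Int) (h0 : 0 ≤ i) (hn : i < n) :
    ((pvFirst F n).getD (F i) (-1) == i) = true ↔ ∀ j : Int, 0 ≤ j → j < i → F j ≠ F i := by
  rw [PySem.Dict.getD_eq_get?_getD, pv_first_get?,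
      PySem.List.pyRange_one_append 0 i n h0 (le_of_lt hn), List.find?_append]
  by_cases hex : ∃ j ∈ PySem.List.pyRange 0 i, (F j == F i) = true
  · obtain ⟨j', hj', hq⟩ := hex
    obtain ⟨o, ho⟩ : ∃ o, (PySem.List.pyRange 0 i).find? (fun j => F j == F i) = some o := by
      have := (List.find?_isSome (p := fun j => F j == F i)).mpr ⟨j', hj', hq⟩
      exact Option.isSome_iff_exists.mp this
    have hom : o ∈ PySem.List.pyRange 0 i := List.mem_of_find?_eq_some ho
    have hoq : (F o == F i) = true := List.find?_some (p := fun j => F j == F i) ho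
    obtain ⟨ho0, holt⟩ := PySem.List.mem_pyRange_one.mp hom
    rw [ho]
    simp only [Option.some_or, Option.getD_some]
    constructor
    · intro h
      exact absurd (beq_iff_eq.mp h) (by omega)
    · intro h
      exact absurd (beq_iff_eq.mp hoq) (h o ho0 holt)
  · have hnone : (PySem.List.pyRange 0 i).find? (fun j => F j == F i) = none := by
      rw [List.find?_eq_none]
      intro j hj
      simp only [Bool.not_eq_true]
      by_contra hc
      exact hex ⟨j, hj, by simpa using hc⟩
    rw [hnone, PySem.List.pyRange_one_cons hn]
    simp only [List.find?_cons, beq_self_eq_true]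
    constructor
    · intro _ j hj0 hji hfe
      exact hex ⟨j, PySem.List.mem_pyRange_one.mpr ⟨hj0, hji⟩, by simp [hfe]⟩
    · intro _
      simp

-- main invariant: A's fold and B's fold agree, and A's keys are the patterns seen so far
theorem pv_main (F : Int → Int × Int × Int × Int) (V : Int → Int) (n : Int) :
    ∀ m : Nat, (m : Int) ≤ n →
      pvA F V (m : Int) = pvB F V n (m : Int) ∧
      ∀ p, ((pvA F V (m : Int)).contains p = true ↔ ∃ j : Int, 0 ≤ j ∧ j < (m : Int) ∧ F j = p) := by
  intro m
  induction m with
  | zero =>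
      intro _
      constructor
      · rfl
      · intro p
        simp only [pvA, PySem.List.pyRange_one]
        simp [PySem.Dict.contains_empty]
        omega
  | succ m ih =>
      intro hle
      have hmle : (m : Int) ≤ n := by push_cast at hle ⊢; omega
      have hmn : (m : Int) < n := by push_cast at hle; omega
      obtain ⟨heq, hc⟩ := ih hmle
      have hstep : PySem.List.pyRange 0 ((m + 1 : Nat) : Int)
          = PySem.List.pyRange 0 (m : Int) ++ [(m : Int)] := by
        have : ((m + 1 : Nat) : Int) = (m : Int) + 1 := by push_cast; ring
        rw [this, PySem.List.pyRange_one_succ_right (by positivity)]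
      have hcond := pv_cond_iff F n (m : Int) (by positivity) hmn
      have hA : pvA F V ((m + 1 : Nat) : Int)
          = (if (pvA F V (m : Int)).contains (F (m : Int)) then pvA F V (m : Int)
             else (pvA F V (m : Int)).insert (F (m : Int)) (V (m : Int))) := by
        simp only [pvA, hstep, List.foldl_append, List.foldl_cons, List.foldl_nil]
      have hB : pvB F V n ((m + 1 : Nat) : Int)
          = (if (pvFirst F n).getD (F (m : Int)) (-1) == (m : Int)
             then (pvB F V n (m : Int)).insert (F (m : Int)) (V (m : Int)) else pvB F V n (m : Int)) := by
        simp only [pvB, hstep, List.foldl_append, List.foldl_cons, List.foldl_nil]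
      by_cases hmem : ∃ j : Int, 0 ≤ j ∧ j < (m : Int) ∧ F j = F (m : Int)
      · -- pattern seen before: A skips (contains), B skips (not earliest)
        have hct : (pvA F V (m : Int)).contains (F (m : Int)) = true := (hc _).mpr hmem
        have hcf : ((pvFirst F n).getD (F (m : Int)) (-1) == (m : Int)) = false := by
          rw [Bool.eq_false_iff]
          intro hb
          obtain ⟨j, hj0, hjm, hje⟩ := hmem
          exact hcond.mp hb j hj0 hjm hje
        rw [hA, hB, hct, hcf]
        simp only [Bool.false_eq_true, if_true, if_false]
        constructor
        · exact heq
        · intro p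
          rw [hc p]
          constructor
          · rintro ⟨j, h1, h2, h3⟩; exact ⟨j, h1, by push_cast; omega, h3⟩
          · rintro ⟨j, h1, h2, h3⟩
            by_cases hjm : j < (m : Int)
            · exact ⟨j, h1, hjm, h3⟩
            · have : j = (m : Int) := by push_cast at h2; omega
              subst this
              obtain ⟨j', hj0, hjm', hje⟩ := h3 ▸ hmem
              exact ⟨j', hj0, hjm', hje⟩
      · -- first occurrence: both insert
        have hct : (pvA F V (m : Int)).contains (F (m : Int)) = false := by
          rw [Bool.eq_false_iff]
          intro hb
          exact hmem ((hc _).mp hb)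
        have hcf : ((pvFirst F n).getD (F (m : Int)) (-1) == (m : Int)) = true := by
          apply hcond.mpr
          intro j hj0 hjm hje
          exact hmem ⟨j, hj0, hjm, hje⟩
        rw [hA, hB, hct, hcf]
        simp only [Bool.false_eq_true, if_false, if_true]
        constructor
        · rw [heq]
        · intro p
          rw [PySem.Dict.contains_insert]
          rw [Bool.or_eq_true, beq_iff_eq]
          constructor
          · rintro (hpe | hpc)
            · exact ⟨(m : Int), by positivity, by push_cast; omega, hpe.symm⟩
            · obtain ⟨j, h1, h2, h3⟩ := (hc p).mp hpc
              exact ⟨j, h1, by push_cast; omega, h3⟩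
          · rintro ⟨j, h1, h2, h3⟩
            by_cases hjm : j < (m : Int)
            · exact Or.inr ((hc p).mpr ⟨j, h1, hjm, h3⟩)
            · have : j = (m : Int) := by push_cast at h2; omega
              subst this
              exact Or.inl h3.symm

theorem find_patterns_eq (prices : List Int) : find_patterns prices = find_patterns_alt prices := by
  unfold find_patterns find_patterns_alt
  simp only []
  set n : Int := (prices.length : Int) - 4 with hn
  set F : Int → Int × Int × Int × Int := fun i =>
      (PySem.List.pyGetD prices (i + 1) 0 - PySem.List.pyGetD prices i 0,
       PySem.List.pyGetD prices (i + 2) 0 - PySem.List.pyGetD prices (i + 1) 0,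
       PySem.List.pyGetD prices (i + 3) 0 - PySem.List.pyGetD prices (i + 2) 0,
       PySem.List.pyGetD prices (i + 4) 0 - PySem.List.pyGetD prices (i + 3) 0) with hF
  set ch : List Int := (PySem.List.pyRange 0 ((prices.length : Int) - 1) 1).map
      (fun i => PySem.List.pyGetD prices (i + 1) 0 - PySem.List.pyGetD prices i 0) with hch
  set pats : List (Int × Int × Int × Int) := (PySem.List.pyRange 0 n 1).map F with hp
  -- A's loop bound equals n
  have hchlen : ch.length = ((prices.length : Int) - 1).toNat := by
    rw [hch]
    simp [PySem.List.length_pyRange_one]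
  have hb : PySem.List.pyRange 0 ((ch.length : Int) - 3) = PySem.List.pyRange 0 n := by
    rw [PySem.List.pyRange_one, PySem.List.pyRange_one]
    have h2 : ((ch.length : Int) - 3 - 0).toNat = (n - 0).toNat := by
      rw [hchlen, hn]
      omega
    rw [h2]
  rw [hb]
  -- A's pattern tuple at i is F i
  have hgc : ∀ k : Int, 0 ≤ k → k < (prices.length : Int) - 1 →
      PySem.List.pyGetD ch k 0 = PySem.List.pyGetD prices (k + 1) 0 - PySem.List.pyGetD prices k 0 := by
    intro k h1 h2
    rw [hch]
    exact PySem.List.pyGetD_map_pyRange_of_nonneg _ _ _ _ h1 h2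
  conv_lhs => rw [PySem.List.foldl_congr_mem (PySem.List.pyRange 0 n) _
      (fun (d : PySem.Dict (Int × Int × Int × Int) Int) i =>
        if d.contains (F i) then d else d.insert (F i) (PySem.List.pyGetD prices (i + 4) 0))
      PySem.Dict.empty
      (by
        intro acc i hi
        obtain ⟨h0, h1⟩ := PySem.List.mem_pyRange_one.mp hi
        have e1 : i + 1 + 1 = i + 2 := by ring
        have e2 : i + 2 + 1 = i + 3 := by ring
        have e3 : i + 3 + 1 = i + 4 := by ring
        rw [hgc i h0 (by omega), hgc (i + 1) (by omega) (by omega),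
            hgc (i + 2) (by omega) (by omega), hgc (i + 3) (by omega) (by omega), e1, e2, e3])]
  -- B's earliest-index dict is pvFirst F n
  have hfst : ((PySem.List.pyRange 0 n 1).reverse).foldl
      (fun (d : PySem.Dict (Int × Int × Int × Int) Int) i =>
        d.insert (PySem.List.pyGetD pats i (0, 0, 0, 0)) i) PySem.Dict.empty = pvFirst F n := by
    unfold pvFirst
    apply PySem.List.foldl_congr_mem
    intro acc i hi
    obtain ⟨h0, h1⟩ := PySem.List.mem_pyRange_one.mp (List.mem_reverse.mp hi)
    rw [hp, PySem.List.pyGetD_map_pyRange_of_nonneg F n i _ h0 h1]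
  simp only [hfst]
  -- B's enumerate loop is an index loop over [0, n)
  rw [PySem.List.enumerate_eq_map_pyRange pats (0, 0, 0, 0)]
  have hplen : pats.length = n.toNat := by
    rw [hp]
    simp [PySem.List.length_pyRange_one]
  have hlp : PySem.List.pyRange 0 (PySem.List.len pats) = PySem.List.pyRange 0 n := by
    rw [PySem.List.pyRange_one, PySem.List.pyRange_one]
    have h2 : (PySem.List.len pats - 0).toNat = (n - 0).toNat := by
      simp only [PySem.List.len_eq, hplen]
      omega
    rw [h2]
  rw [hlp, List.foldl_map]
  dsimp only
  conv_rhs => rw [PySem.List.foldl_congr_mem (PySem.List.pyRange 0 n) _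
      (fun (d : PySem.Dict (Int × Int × Int × Int) Int) j =>
        if (pvFirst F n).getD (F j) (-1) == j then d.insert (F j) (PySem.List.pyGetD prices (j + 4) 0)
        else d)
      PySem.Dict.empty
      (by
        intro acc j hj
        obtain ⟨h0, h1⟩ := PySem.List.mem_pyRange_one.mp hj
        rw [hp, PySem.List.pyGetD_map_pyRange_of_nonneg F n j _ h0 h1])]
  -- both sides are now pvA / pvB; they are equal
  have hAB : pvA F (fun i => PySem.List.pyGetD prices (i + 4) 0) n
      = pvB F (fun i => PySem.List.pyGetD prices (i + 4) 0) n n := by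
    by_cases hpos : 0 ≤ n
    · have hnn : ((n.toNat : Int)) = n := Int.toNat_of_nonneg hpos
      have h := (pv_main F (fun i => PySem.List.pyGetD prices (i + 4) 0) n n.toNat (by rw [hnn])).1
      rwa [hnn] at h
    · have he : PySem.List.pyRange 0 n = [] := by
        rw [PySem.List.pyRange_one]
        have h0 : (n - 0).toNat = 0 := by omega
        rw [h0]
        rfl
      unfold pvA pvB
      rw [he]
      rfl
  unfold pvA pvB at hAB
  simp only [] at hAB
  rw [hAB]

-- ===== VERDICT (by name: the statement is the Claim_ definition above) =====
theorem find_patterns_spec : Claim_equal_find_patterns := by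
  intro prices _
  unfold Spec_find_patterns
  exact find_patterns_eq prices
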